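-- pv_equiv track=rewrite | github.com/simple0710/BOJ | silver/[20529] 가장 가까운 세 사람의 심리적 거리.py | solution
-- ===== SOURCE A (Python) =====
-- def solution(N, data):
--   # MBTI는 총 16개에 각각 두 개씩 있다면 32이다.
--   # 따라서 32를 초과하면 정답은 0이 된다.
--   if N > 32:
--     return 0
--   res = 100
--   for i in range(N-2): # 모든 경우를 탐색해 본다.
--     for j in range(i+1, N):
--       for k in range(j+1, N):
--         check = 0
--         for n in range(4):
--           if data[i][n] != data[j][n]: # A, B
--             check += 1
--           if data[i][n] != data[k][n]: # A, C
--             check += 1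
--           if data[j][n] != data[k][n]: # B, C
--             check += 1
--         res = min(res, check) # 최저값 갱신
--   return res # 정답 반환
-- ===== SOURCE B (Python) =====
-- def solution(N, data):
--   # Precompute the full pairwise-distance table once, then scan triples.
--   if N > 32:
--     return 0
--   if N < 3:
--     return 100
--   d = [[sum(data[i][n] != data[j][n] for n in range(4)) for j in range(N)]
--        for i in range(N)]
--   res = 100
--   for i in range(N - 2):
--     for j in range(i + 1, N):
--       for k in range(j + 1, N):
--         res = min(res, d[i][j] + d[i][k] + d[j][k])
--   return res
-- ===== Notes on version B (the rewrite author's own statement) =====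
-- stated objective: alternative
-- what changed: B precomputes an N x N pairwise-distance table once and the triple loop just adds three table entries, instead of recomputing the 4-character comparison loop for every triple; it trades extra table memory for removing the inner comparison loop.
import Mathlib
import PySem

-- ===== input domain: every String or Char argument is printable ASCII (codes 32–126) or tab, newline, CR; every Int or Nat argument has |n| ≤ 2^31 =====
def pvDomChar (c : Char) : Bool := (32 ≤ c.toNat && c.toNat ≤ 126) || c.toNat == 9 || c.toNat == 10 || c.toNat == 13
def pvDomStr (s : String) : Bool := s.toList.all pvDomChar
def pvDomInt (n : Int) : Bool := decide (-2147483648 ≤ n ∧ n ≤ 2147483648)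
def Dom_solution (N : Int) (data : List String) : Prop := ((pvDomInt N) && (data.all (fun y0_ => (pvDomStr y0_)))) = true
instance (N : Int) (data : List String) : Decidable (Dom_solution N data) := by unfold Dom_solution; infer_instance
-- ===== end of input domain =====

-- B precomputes the pairwise-distance table once; the triple loop then only adds three table entries.

-- shared helper: data[i][n] as a Char; exact under Pre_ (both indices in range there)
def chAt (data : List String) (i n : Int) : Char :=
  ((PySem.Str.pyGet? (PySem.List.pyGetD data i "") n)).getD ' '

-- ===== PORT A =====
def solution (N : Int) (data : List String) : Int :=
  if N > 32 then 0
  else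
    (PySem.List.pyRange 0 (N - 2) 1).foldl (fun res i =>
      (PySem.List.pyRange (i + 1) N 1).foldl (fun res j =>
        (PySem.List.pyRange (j + 1) N 1).foldl (fun res k =>
          let check : Int :=
            (PySem.List.pyRange 0 4 1).foldl (fun check n =>
              let check := if chAt data i n ≠ chAt data j n then check + 1 else check
              let check := if chAt data i n ≠ chAt data k n then check + 1 else check
              if chAt data j n ≠ chAt data k n then check + 1 else check) 0
          min res check) res) res) 100

-- ===== PORT B =====
-- B-side helper: table lookup d[i][j]
def tbl (d : List (List Int)) (i j : Int) : Int :=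
  PySem.List.pyGetD (PySem.List.pyGetD d i []) j 0

def solution_alt (N : Int) (data : List String) : Int :=
  if N > 32 then 0
  else if N < 3 then 100
  else
    let d : List (List Int) :=
      (PySem.List.pyRange 0 N 1).map (fun i =>
        (PySem.List.pyRange 0 N 1).map (fun j =>
          ((PySem.List.pyRange 0 4 1).map
            (fun n => if chAt data i n ≠ chAt data j n then (1 : Int) else 0)).sum))
    (PySem.List.pyRange 0 (N - 2) 1).foldl (fun res i =>
      (PySem.List.pyRange (i + 1) N 1).foldl (fun res j =>
        (PySem.List.pyRange (j + 1) N 1).foldl (fun res k =>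
          min res (tbl d i j + tbl d i k + tbl d j k)) res) res) 100

-- ===== PRECONDITION & SPEC =====
-- Pre_ excludes exactly the IndexError inputs: with 3 ≤ N ≤ 32, A indexes data[0..N-1][0..3],
-- so it raises unless data has ≥ N strings and each of the first N has length ≥ 4.
def Pre_solution (N : Int) (data : List String) : Prop :=
  N > 32 ∨ N < 3 ∨ (N ≤ (data.length : Int) ∧ (data.take N.toNat).all (fun s => 4 ≤ s.length) = true)
instance (N : Int) (data : List String) : Decidable (Pre_solution N data) := by
  unfold Pre_solution; infer_instance

def pvWitness_solution : Int × List String := (3, ["ENFP", "ENFP", "ISTJ"])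

def Spec_solution (N : Int) (data : List String) (out : Int) : Prop := out = solution_alt N data
instance (N : Int) (data : List String) (out : Int) : Decidable (Spec_solution N data out) := by
  unfold Spec_solution; infer_instance

-- ===== CLAIM (what is proved, stated in full; the proofs are below) =====
def Claim_equal_solution : Prop := ∀ (N : Int) (data : List String), Dom_solution N data → Pre_solution N data → Spec_solution N data (solution N data)

-- ===== LEMMAS AND PROOFS =====

-- pairwise distance as a plain sum
def pairDist (data : List String) (i j : Int) : Int :=
  ((PySem.List.pyRange 0 4 1).map
    (fun n => if chAt data i n ≠ chAt data j n then (1 : Int) else 0)).sum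

lemma tbl_eq (data : List String) (N i j : Int) (hi0 : 0 ≤ i) (hiN : i < N)
    (hj0 : 0 ≤ j) (hjN : j < N) :
    tbl ((PySem.List.pyRange 0 N 1).map (fun i =>
      (PySem.List.pyRange 0 N 1).map (fun j =>
        ((PySem.List.pyRange 0 4 1).map
          (fun n => if chAt data i n ≠ chAt data j n then (1 : Int) else 0)).sum))) i j
      = pairDist data i j := by
  unfold tbl pairDist
  rw [PySem.List.pyGetD_map_pyRange_of_nonneg _ N i _ hi0 hiN,
      PySem.List.pyGetD_map_pyRange_of_nonneg _ N j _ hj0 hjN]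

lemma check_eq (data : List String) (i j k : Int) :
    (PySem.List.pyRange 0 4 1).foldl (fun check n =>
        let check := if chAt data i n ≠ chAt data j n then check + 1 else check
        let check := if chAt data i n ≠ chAt data k n then check + 1 else check
        if chAt data j n ≠ chAt data k n then check + 1 else check) (0 : Int)
      = pairDist data i j + pairDist data i k + pairDist data j k := by
  have h4 : PySem.List.pyRange 0 4 1 = [0, 1, 2, 3] := by decide
  unfold pairDist
  rw [h4]
  simp only [List.foldl, List.map, List.sum_cons, List.sum_nil]
  have hadd : ∀ (c : Prop) [Decidable c] (x : Int),
      (if c then x + 1 else x) = x + (if c then 1 else 0) := by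
    intro c _ x; split <;> ring
  simp only [hadd]
  ring

theorem solution_spec : Claim_equal_solution := by
  intro N data _ _
  unfold Spec_solution solution solution_alt
  by_cases h32 : N > 32
  · simp [h32]
  · simp only [if_neg h32]
    by_cases h3 : N < 3
    · rw [if_pos h3, PySem.List.pyRange_one_eq_nil (by omega : N - 2 ≤ 0)]
      rfl
    · rw [if_neg h3]
      apply PySem.List.foldl_congr_mem
      intro res i hi
      rw [PySem.List.mem_pyRange_one] at hi
      apply PySem.List.foldl_congr_mem
      intro res j hj
      rw [PySem.List.mem_pyRange_one] at hj
      apply PySem.List.foldl_congr_mem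
      intro res k hk
      rw [PySem.List.mem_pyRange_one] at hk
      rw [check_eq data i j k,
          tbl_eq data N i j (by omega) (by omega) (by omega) (by omega),
          tbl_eq data N i k (by omega) (by omega) (by omega) (by omega),
          tbl_eq data N j k (by omega) (by omega) (by omega) (by omega)]
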